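-- pv_equiv track=rewrite | github.com/FudanBSRL/DFM | double_pendulum_ex3/discover.py | num_candidates
-- ===== SOURCE A (Python) =====
-- def num_candidates(num_Lin):
--     cnt = 1
--     cnt += num_Lin
--     cnt += 4
--
--     num_Lin += 4
--
--     for i in range(num_Lin):
--         for j in range(i, num_Lin):
--             cnt += 1
--             if i < 4 and j < 4:
--                 cnt += 2
--                 if i != j:
--                     cnt += 2
--
--     for i in range(num_Lin):
--         for j in range(i, num_Lin):
--             for k in range(j, num_Lin):
--                 cnt += 1
--
--     for i in range(num_Lin):
--         for j in range(i, num_Lin):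
--             for k in range(j, num_Lin):
--                 for l in range(k, num_Lin):
--                     cnt += 1
--
--     return cnt
-- ===== SOURCE B (Python) =====
-- def num_candidates(num_Lin):
--     # Closed-form count: multiset-combination formulas replace the nested loops.
--     n = max(num_Lin + 4, 0)          # loop bound (empty ranges for negative bounds)
--     t = min(n, 4)                    # pairs with both indices < 4
--     pairs = n * (n + 1) // 2                         # C(n+1, 2)
--     triples = n * (n + 1) * (n + 2) // 6             # C(n+2, 3)
--     quads = n * (n + 1) * (n + 2) * (n + 3) // 24    # C(n+3, 4)
--     bonus = t * (t + 1) + t * (t - 1)                # 2*C(t+1,2) + 2*C(t,2)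
--     return 5 + num_Lin + pairs + bonus + triples + quads
-- ===== Notes on version B (the rewrite author's own statement) =====
-- stated objective: faster
-- what changed: Replaced the quadruply nested counting loops by closed-form multiset-combination (binomial) formulas plus a small closed-form correction term for the low-index bonus counts.
import Mathlib
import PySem

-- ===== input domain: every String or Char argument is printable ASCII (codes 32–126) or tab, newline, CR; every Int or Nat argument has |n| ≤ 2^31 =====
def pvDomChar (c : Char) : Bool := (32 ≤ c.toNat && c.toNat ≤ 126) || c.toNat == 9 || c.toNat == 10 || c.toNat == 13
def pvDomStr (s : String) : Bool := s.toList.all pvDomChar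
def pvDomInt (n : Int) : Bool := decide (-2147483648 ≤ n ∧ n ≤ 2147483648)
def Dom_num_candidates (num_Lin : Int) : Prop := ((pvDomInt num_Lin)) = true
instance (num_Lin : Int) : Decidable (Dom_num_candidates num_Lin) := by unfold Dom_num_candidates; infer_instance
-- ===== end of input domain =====

-- B replaces A's quartic nested counting loops by closed-form combinatorial formulas (constant-time); return values proved equal for all inputs.

-- ===== PORT A =====
def num_candidates (num_Lin : Int) : Int :=
  let cnt : Int := 1
  let cnt := cnt + num_Lin
  let cnt := cnt + 4
  let n := num_Lin + 4          -- Python's 'num_Lin += 4'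
  let cnt := (PySem.List.pyRange 0 n 1).foldl (fun cnt i =>
      (PySem.List.pyRange i n 1).foldl (fun cnt j =>
        let cnt := cnt + 1
        if i < 4 ∧ j < 4 then
          let cnt := cnt + 2
          if i ≠ j then cnt + 2 else cnt
        else cnt) cnt) cnt
  let cnt := (PySem.List.pyRange 0 n 1).foldl (fun cnt i =>
      (PySem.List.pyRange i n 1).foldl (fun cnt j =>
        (PySem.List.pyRange j n 1).foldl (fun cnt _ => cnt + 1) cnt) cnt) cnt
  let cnt := (PySem.List.pyRange 0 n 1).foldl (fun cnt i =>
      (PySem.List.pyRange i n 1).foldl (fun cnt j =>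
        (PySem.List.pyRange j n 1).foldl (fun cnt k =>
          (PySem.List.pyRange k n 1).foldl (fun cnt _ => cnt + 1) cnt) cnt) cnt) cnt
  cnt

-- ===== PORT B =====
def num_candidates_alt (num_Lin : Int) : Int :=
  let n := max (num_Lin + 4) 0
  let t := min n 4
  let pairs := PySem.Int.floordiv (n * (n + 1)) 2
  let triples := PySem.Int.floordiv (n * (n + 1) * (n + 2)) 6
  let quads := PySem.Int.floordiv (n * (n + 1) * (n + 2) * (n + 3)) 24
  let bonus := t * (t + 1) + t * (t - 1)
  5 + num_Lin + pairs + bonus + triples + quads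

-- ===== PRECONDITION & SPEC =====
def Spec_num_candidates (num_Lin : Int) (out : Int) : Prop := out = num_candidates_alt num_Lin
instance (num_Lin : Int) (out : Int) : Decidable (Spec_num_candidates num_Lin out) := by unfold Spec_num_candidates; infer_instance

-- ===== CLAIM (what is proved, stated in full; the proofs are below) =====
def Claim_equal_num_candidates : Prop := ∀ (num_Lin : Int), Dom_num_candidates num_Lin → Spec_num_candidates num_Lin (num_candidates num_Lin)

-- ===== LEMMAS AND PROOFS =====

def c2 : Nat → Int | 0 => 0 | (m+1) => c2 m + (m+1)
def c3 : Nat → Int | 0 => 0 | (m+1) => c3 m + c2 (m+1)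
def c4 : Nat → Int | 0 => 0 | (m+1) => c4 m + c3 (m+1)

lemma c2_closed (m : Nat) : 2 * c2 m = (m : Int) * (m + 1) := by
  induction m with
  | zero => simp [c2]
  | succ m ih => simp only [c2]; push_cast; linear_combination ih

lemma c3_closed (m : Nat) : 6 * c3 m = (m : Int) * (m + 1) * (m + 2) := by
  induction m with
  | zero => simp [c3]
  | succ m ih =>
      simp only [c3]; push_cast
      have h2 := c2_closed (m+1); push_cast at h2
      linear_combination ih + 3 * h2

lemma c4_closed (m : Nat) : 24 * c4 m = (m : Int) * (m + 1) * (m + 2) * (m + 3) := by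
  induction m with
  | zero => simp [c4]
  | succ m ih =>
      simp only [c4]; push_cast
      have h3 := c3_closed (m+1); push_cast at h3
      linear_combination ih + 4 * h3

lemma sum_lin : ∀ (m : Nat) (a b : Int), (b - a).toNat = m →
    ((PySem.List.pyRange a b).map (fun j => ((b - j).toNat : Int))).sum = c2 m := by
  intro m
  induction m with
  | zero => intro a b h; rw [PySem.List.pyRange_one_eq_nil (by omega)]; simp [c2]
  | succ m ih =>
      intro a b h
      rw [PySem.List.pyRange_one_cons (by omega : a < b)]
      simp only [List.map_cons, List.sum_cons, ih (a+1) b (by omega)]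
      have : (b - a).toNat = m + 1 := h
      simp only [c2]; omega

lemma sum_c2 : ∀ (m : Nat) (a b : Int), (b - a).toNat = m →
    ((PySem.List.pyRange a b).map (fun j => c2 (b - j).toNat)).sum = c3 m := by
  intro m
  induction m with
  | zero => intro a b h; rw [PySem.List.pyRange_one_eq_nil (by omega)]; simp [c3]
  | succ m ih =>
      intro a b h
      rw [PySem.List.pyRange_one_cons (by omega : a < b)]
      simp only [List.map_cons, List.sum_cons, ih (a+1) b (by omega), h]
      simp only [c3]; omega

lemma sum_c3 : ∀ (m : Nat) (a b : Int), (b - a).toNat = m →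
    ((PySem.List.pyRange a b).map (fun j => c3 (b - j).toNat)).sum = c4 m := by
  intro m
  induction m with
  | zero => intro a b h; rw [PySem.List.pyRange_one_eq_nil (by omega)]; simp [c4]
  | succ m ih =>
      intro a b h
      rw [PySem.List.pyRange_one_cons (by omega : a < b)]
      simp only [List.map_cons, List.sum_cons, ih (a+1) b (by omega), h]
      simp only [c4]; omega

-- innermost count loop
lemma loop1 (a b c : Int) :
    (PySem.List.pyRange a b).foldl (fun c _ => c + 1) c = c + ((b - a).toNat : Int) := by
  rw [PySem.List.foldl_add _ (fun _ => (1:Int))]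
  rw [PySem.List.sum_map_const_int, PySem.List.length_pyRange_one]
  ring

def bonus (i j : Int) : Int := if i < 4 ∧ j < 4 then (if i ≠ j then 4 else 2) else 0

lemma pair_lambda_eq (i : Int) :
    (fun (cnt j : Int) => if i < 4 ∧ j < 4 then (if i ≠ j then cnt + 1 + 2 + 2 else cnt + 1 + 2) else cnt + 1)
    = fun cnt j => cnt + (1 + bonus i j) := by
  funext cnt j; simp only [bonus]; split_ifs <;> ring

lemma pair_inner (i a b c : Int) :
    (PySem.List.pyRange a b).foldl
      (fun (cnt j : Int) => if i < 4 ∧ j < 4 then (if i ≠ j then cnt + 1 + 2 + 2 else cnt + 1 + 2) else cnt + 1) c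
    = c + ((b - a).toNat : Int) + ((PySem.List.pyRange a b).map (bonus i)).sum := by
  rw [pair_lambda_eq, PySem.List.foldl_add]
  rw [PySem.List.sum_map_add_int _ (fun _ => (1:Int)) (bonus i)]
  rw [PySem.List.sum_map_const_int, PySem.List.length_pyRange_one]
  ring

lemma bonus_small (i t : Int) (h0 : 0 ≤ i) (hit : i < t) (ht : t ≤ 4) :
    ((PySem.List.pyRange i t).map (bonus i)).sum = 4 * (t - i) - 2 := by
  have hi4 : i < 4 := lt_of_lt_of_le hit ht
  interval_cases i <;> interval_cases t <;> decide

lemma bonus_sum_small (t : Int) (h0 : 0 ≤ t) (ht : t ≤ 4) :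
    ((PySem.List.pyRange 0 t).map (fun i => 4 * (t - i) - 2)).sum = t * (t + 1) + t * (t - 1) := by
  interval_cases t <;> decide

lemma bonus_zero (i j : Int) (h : 4 ≤ i) : bonus i j = 0 := by
  simp only [bonus, if_neg (by omega : ¬ (i < 4 ∧ j < 4))]

lemma inner_zero (i a b : Int) (h : 4 ≤ i) : ((PySem.List.pyRange a b).map (bonus i)).sum = 0 := by
  apply List.sum_eq_zero; intro x hx
  obtain ⟨j, _, rfl⟩ := List.mem_map.mp hx
  exact bonus_zero i j h

lemma bsum_eval (n i : Int) (hn : 0 ≤ n) (h0 : 0 ≤ i) (hit : i < min n 4) :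
    ((PySem.List.pyRange i n).map (bonus i)).sum = 4 * (min n 4 - i) - 2 := by
  rw [PySem.List.pyRange_one_append i (min n 4) n (by omega) (by omega), List.map_append,
      List.sum_append]
  have hz : ((PySem.List.pyRange (min n 4) n).map (bonus i)).sum = 0 := by
    apply List.sum_eq_zero; intro x hx
    obtain ⟨j, hj, rfl⟩ := List.mem_map.mp hx
    rw [PySem.List.mem_pyRange_one] at hj
    simp only [bonus, if_neg (by omega : ¬ (i < 4 ∧ j < 4))]
  rw [hz, bonus_small i (min n 4) h0 hit (by omega)]; ring

lemma pair_total (n c : Int) (hn : 0 ≤ n) :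
    (PySem.List.pyRange 0 n).foldl
      (fun cnt i => (PySem.List.pyRange i n).foldl
        (fun (cnt j : Int) => if i < 4 ∧ j < 4 then (if i ≠ j then cnt + 1 + 2 + 2 else cnt + 1 + 2) else cnt + 1) cnt) c
    = c + c2 n.toNat + (min n 4 * (min n 4 + 1) + min n 4 * (min n 4 - 1)) := by
  have hbody : (fun (cnt i : Int) => (PySem.List.pyRange i n).foldl
        (fun (cnt j : Int) => if i < 4 ∧ j < 4 then (if i ≠ j then cnt + 1 + 2 + 2 else cnt + 1 + 2) else cnt + 1) cnt)
      = fun cnt i => cnt + ((((n - i).toNat : Int)) + ((PySem.List.pyRange i n).map (bonus i)).sum) := by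
    funext cnt i; rw [pair_inner]; ring
  rw [hbody, PySem.List.foldl_add,
      PySem.List.sum_map_add_int _ (fun i => ((n - i).toNat : Int)) (fun i => ((PySem.List.pyRange i n).map (bonus i)).sum),
      sum_lin n.toNat 0 n (by omega)]
  have hsplit : ((PySem.List.pyRange 0 n).map (fun i => ((PySem.List.pyRange i n).map (bonus i)).sum)).sum
      = min n 4 * (min n 4 + 1) + min n 4 * (min n 4 - 1) := by
    rw [PySem.List.pyRange_one_append 0 (min n 4) n (by omega) (by omega), List.map_append,
        List.sum_append]
    have hz : ((PySem.List.pyRange (min n 4) n).map (fun i => ((PySem.List.pyRange i n).map (bonus i)).sum)).sum = 0 := by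
      apply List.sum_eq_zero; intro x hx
      obtain ⟨i, hi, rfl⟩ := List.mem_map.mp hx
      rw [PySem.List.mem_pyRange_one] at hi
      exact inner_zero i i n (by omega)
    have hc : (PySem.List.pyRange 0 (min n 4)).map (fun i => ((PySem.List.pyRange i n).map (bonus i)).sum)
        = (PySem.List.pyRange 0 (min n 4)).map (fun i => 4 * (min n 4 - i) - 2) := by
      apply List.map_congr_left; intro i hi
      rw [PySem.List.mem_pyRange_one] at hi
      exact bsum_eval n i hn hi.1 hi.2
    rw [hz, hc, bonus_sum_small (min n 4) (by omega) (by omega)]; ring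
  rw [hsplit]; ring

lemma trip_mid (n i c : Int) :
    (PySem.List.pyRange i n).foldl (fun c j => (PySem.List.pyRange j n).foldl (fun c _ => c + 1) c) c
    = c + c2 (n - i).toNat := by
  have h : (fun (c j : Int) => (PySem.List.pyRange j n).foldl (fun c _ => c + 1) c)
      = fun c j => c + ((n - j).toNat : Int) := by funext c j; rw [loop1]
  rw [h, PySem.List.foldl_add, sum_lin (n - i).toNat i n rfl]

lemma trip_total (n c : Int) :
    (PySem.List.pyRange 0 n).foldl
      (fun c i => (PySem.List.pyRange i n).foldl
        (fun c j => (PySem.List.pyRange j n).foldl (fun c _ => c + 1) c) c) c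
    = c + c3 n.toNat := by
  have h : (fun (c i : Int) => (PySem.List.pyRange i n).foldl
        (fun c j => (PySem.List.pyRange j n).foldl (fun c _ => c + 1) c) c)
      = fun c i => c + c2 (n - i).toNat := by funext c i; rw [trip_mid]
  rw [h, PySem.List.foldl_add, sum_c2 n.toNat 0 n (by omega)]

lemma quad_mid (n i c : Int) :
    (PySem.List.pyRange i n).foldl
      (fun c j => (PySem.List.pyRange j n).foldl
        (fun c k => (PySem.List.pyRange k n).foldl (fun c _ => c + 1) c) c) c
    = c + c3 (n - i).toNat := by
  have h : (fun (c j : Int) => (PySem.List.pyRange j n).foldl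
        (fun c k => (PySem.List.pyRange k n).foldl (fun c _ => c + 1) c) c)
      = fun c j => c + c2 (n - j).toNat := by funext c j; rw [trip_mid]
  rw [h, PySem.List.foldl_add, sum_c2 (n - i).toNat i n rfl]

lemma quad_total (n c : Int) :
    (PySem.List.pyRange 0 n).foldl
      (fun c i => (PySem.List.pyRange i n).foldl
        (fun c j => (PySem.List.pyRange j n).foldl
          (fun c k => (PySem.List.pyRange k n).foldl (fun c _ => c + 1) c) c) c) c
    = c + c4 n.toNat := by
  have h : (fun (c i : Int) => (PySem.List.pyRange i n).foldl
        (fun c j => (PySem.List.pyRange j n).foldl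
          (fun c k => (PySem.List.pyRange k n).foldl (fun c _ => c + 1) c) c) c)
      = fun c i => c + c3 (n - i).toNat := by funext c i; rw [quad_mid]
  rw [h, PySem.List.foldl_add, sum_c3 n.toNat 0 n (by omega)]

lemma fd_double (q : Int) : PySem.Int.floordiv (2 * q) 2 = q := by
  rw [PySem.Int.floordiv_eq_iff_of_pos (by norm_num)]; omega

lemma fd_six (q : Int) : PySem.Int.floordiv (6 * q) 6 = q := by
  rw [PySem.Int.floordiv_eq_iff_of_pos (by norm_num)]; omega

lemma fd_24 (q : Int) : PySem.Int.floordiv (24 * q) 24 = q := by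
  rw [PySem.Int.floordiv_eq_iff_of_pos (by norm_num)]; omega

theorem num_candidates_eq (num_Lin : Int) : num_candidates num_Lin = num_candidates_alt num_Lin := by
  simp only [num_candidates, num_candidates_alt]
  rcases le_or_gt (num_Lin + 4) 0 with hm | hm
  · rw [PySem.List.pyRange_one_eq_nil hm]
    simp only [List.foldl_nil]
    have hmax : max (num_Lin + 4) 0 = 0 := by omega
    rw [hmax]
    norm_num
    omega
  · rw [pair_total (num_Lin + 4) _ (by omega), trip_total, quad_total]
    have hmax : max (num_Lin + 4) 0 = num_Lin + 4 := by omega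
    rw [hmax]
    have hN : (((num_Lin + 4).toNat : Int)) = num_Lin + 4 := by omega
    have h2' := c2_closed (num_Lin + 4).toNat
    have h3' := c3_closed (num_Lin + 4).toNat
    have h4' := c4_closed (num_Lin + 4).toNat
    rw [hN] at h2' h3' h4'
    rw [show (num_Lin + 4) * (num_Lin + 4 + 1) * (num_Lin + 4 + 2) * (num_Lin + 4 + 3) = 24 * c4 (num_Lin + 4).toNat by linarith,
        show (num_Lin + 4) * (num_Lin + 4 + 1) * (num_Lin + 4 + 2) = 6 * c3 (num_Lin + 4).toNat by linarith,
        show (num_Lin + 4) * (num_Lin + 4 + 1) = 2 * c2 (num_Lin + 4).toNat by linarith,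
        fd_double, fd_six, fd_24]
    ring

-- ===== VERDICT (by name: the statement is the Claim_ definition above) =====
theorem num_candidates_spec : Claim_equal_num_candidates := by
  intro num_Lin _
  unfold Spec_num_candidates
  exact num_candidates_eq num_Lin
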